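-- pv_equiv track=rewrite | github.com/InezaMbabazi/learning | workload.py | split_students
-- ===== SOURCE A (Python) =====
-- def split_students(total, min_size=30, max_size=70):
--     if total <= max_size:
--         return [total]
--     valid_splits = []
--     for group_count in range(1, total + 1):
--         base = total // group_count
--         remainder = total % group_count
--         if base > max_size or base < min_size:
--             continue
--         group_sizes = [base + 1 if i < remainder else base for i in range(group_count)]
--         if all(min_size <= g <= max_size for g in group_sizes):
--             valid_splits.append(group_sizes)
--     if valid_splits:
--         valid_splits.sort(key=lambda g: (len(g), max(g) - min(g)))
--         return valid_splits[0]
--     return [total]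
-- ===== SOURCE B (Python) =====
-- def split_students(total, min_size=30, max_size=70):
--     # A valid split into g groups is fully determined by g (sizes total//g and
--     # total//g + 1); the sort in the original picks the split with the fewest
--     # groups, i.e. the smallest valid g.  Groups cannot be larger than max_size,
--     # so no g below ceil(total/(max_size+1) ...) can work: start there and stop
--     # as soon as the base size drops below min_size (it only shrinks as g grows).
--     if total <= max_size or max_size <= 0:
--         return [total]
--     for g in range(total // (max_size + 1) + 1, total + 1):
--         base, rem = divmod(total, g)
--         if base < min_size:
--             break
--         if rem == 0 or base + 1 <= max_size:
--             return [base + 1] * rem + [base] * (g - rem)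
--     return [total]
-- ===== Notes on version B (the rewrite author's own statement) =====
-- stated objective: faster
-- what changed: Instead of enumerating every group count from 1 to total, building each candidate split, filtering, and sorting by (length, spread), B starts at the smallest feasible group count total//(max_size+1)+1, checks a purely arithmetic validity condition, and returns the first (= fewest-groups) valid split directly, stopping as soon as the base size falls below min_size.
import Mathlib
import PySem

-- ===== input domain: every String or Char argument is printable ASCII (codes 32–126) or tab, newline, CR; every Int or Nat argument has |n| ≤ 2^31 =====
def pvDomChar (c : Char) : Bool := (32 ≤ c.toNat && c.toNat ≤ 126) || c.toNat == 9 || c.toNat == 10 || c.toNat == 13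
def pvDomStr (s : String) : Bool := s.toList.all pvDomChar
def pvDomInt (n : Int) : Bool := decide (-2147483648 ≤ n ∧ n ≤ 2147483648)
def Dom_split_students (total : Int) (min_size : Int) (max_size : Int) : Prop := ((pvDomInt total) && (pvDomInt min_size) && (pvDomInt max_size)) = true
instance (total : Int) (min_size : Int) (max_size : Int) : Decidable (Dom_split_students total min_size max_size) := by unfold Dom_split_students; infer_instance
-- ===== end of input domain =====

-- B replaces A's enumerate-all-group-counts + sort by (length, spread) with a direct scan for the
-- smallest feasible group count, starting at total // (max_size + 1) + 1 (objective: faster).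

-- ===== PORT A =====
def split_students (total : Int) (min_size : Int) (max_size : Int) : List Int :=
  if total ≤ max_size then [total]
  else
    let valid_splits :=
      (PySem.List.pyRange 1 (total + 1) 1).foldl (fun acc group_count =>
        let base := PySem.Int.floordiv total group_count
        let remainder := PySem.Int.mod total group_count
        if base > max_size ∨ base < min_size then acc
        else
          let group_sizes := (PySem.List.pyRange 0 group_count 1).map
            (fun i => if i < remainder then base + 1 else base)
          if group_sizes.all (fun g => decide (min_size ≤ g) && decide (g ≤ max_size)) then
            acc ++ [group_sizes]
          else acc) []
    if valid_splits ≠ [] then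
      -- every stored group_sizes list is nonempty, so the `.getD 0` defaults of max?/min?
      -- (Python's max/min, which would raise only on an empty list) are never used
      PySem.List.pyGetD
        (PySem.List.sorted2 valid_splits
          (fun g => PySem.List.len g)
          (fun g => (PySem.List.max? g (fun x => x)).getD 0 - (PySem.List.min? g (fun x => x)).getD 0))
        0 []
    else [total]

-- ===== PORT B =====
def split_students_loop (total : Int) (min_size : Int) (max_size : Int) : List Int → List Int
  | [] => [total]
  | g :: rest =>
    let base := PySem.Int.floordiv total g
    let rem := PySem.Int.mod total g
    if base < min_size then [total]
    else if rem = 0 ∨ base + 1 ≤ max_size then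
      List.replicate rem.toNat (base + 1) ++ List.replicate (g - rem).toNat base
    else split_students_loop total min_size max_size rest

def split_students_alt (total : Int) (min_size : Int) (max_size : Int) : List Int :=
  if total ≤ max_size ∨ max_size ≤ 0 then [total]
  else split_students_loop total min_size max_size
    (PySem.List.pyRange (PySem.Int.floordiv total (max_size + 1) + 1) (total + 1) 1)

-- ===== PRECONDITION & SPEC =====
def Spec_split_students (total : Int) (min_size : Int) (max_size : Int) (out : List Int) : Prop := out = split_students_alt total min_size max_size
instance (total : Int) (min_size : Int) (max_size : Int) (out : List Int) : Decidable (Spec_split_students total min_size max_size out) := by unfold Spec_split_students; infer_instance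

-- ===== CLAIM (what is proved, stated in full; the proofs are below) =====
def Claim_equal_split_students : Prop := ∀ (total : Int) (min_size : Int) (max_size : Int), Dom_split_students total min_size max_size → Spec_split_students total min_size max_size (split_students total min_size max_size)

-- ===== LEMMAS AND PROOFS =====

-- the split determined by a group count gc, exactly as A builds it
def pvSplit (t gc : Int) : List Int :=
  (PySem.List.pyRange 0 gc 1).map
    (fun i => if i < PySem.Int.mod t gc then PySem.Int.floordiv t gc + 1 else PySem.Int.floordiv t gc)

-- arithmetic validity of a group count (B's test, with the base ≤ max bound made explicit)
def pvValid (t mi ma gc : Int) : Bool :=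
  decide (mi ≤ PySem.Int.floordiv t gc) && decide (PySem.Int.floordiv t gc ≤ ma) &&
    (decide (PySem.Int.mod t gc = 0) || decide (PySem.Int.floordiv t gc + 1 ≤ ma))

-- A's per-iteration test, as one boolean
def pvQ (t mi ma gc : Int) : Bool :=
  !(decide (PySem.Int.floordiv t gc > ma ∨ PySem.Int.floordiv t gc < mi)) &&
    (pvSplit t gc).all (fun g => decide (mi ≤ g) && decide (g ≤ ma))

theorem pv_ediv_anti {t a c : Int} (ht : 0 ≤ t) (ha : 0 < a) (hac : a ≤ c) : t / c ≤ t / a := by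
  have h0 : 0 ≤ t / c := Int.ediv_nonneg ht (by omega)
  have h1 : t / c * a ≤ t / c * c := mul_le_mul_of_nonneg_left hac h0
  have h2 : t / c * c ≤ t := Int.ediv_mul_le t (by omega)
  exact (Int.le_ediv_iff_mul_le ha).mpr (le_trans h1 h2)

theorem pvSplit_eq_replicate (t gc : Int) (h : 0 < gc) :
    pvSplit t gc = List.replicate (PySem.Int.mod t gc).toNat (PySem.Int.floordiv t gc + 1) ++
      List.replicate (gc - PySem.Int.mod t gc).toNat (PySem.Int.floordiv t gc) := by
  unfold pvSplit
  rw [PySem.Int.floordiv_eq_ediv_of_pos h, PySem.Int.mod_eq_emod_of_pos h]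
  have hr0 : 0 ≤ t % gc := Int.emod_nonneg t (by omega)
  have hr1 : t % gc < gc := Int.emod_lt_of_pos t h
  rw [PySem.List.pyRange_one_append 0 (t % gc) gc hr0 (le_of_lt hr1), List.map_append]
  congr 1
  · rw [List.map_congr_left (g := fun _ => t / gc + 1)
      (by intro i hi; rw [PySem.List.mem_pyRange_one] at hi; simp [hi.2])]
    rw [List.map_const', PySem.List.length_pyRange_one]
    congr 1; omega
  · rw [List.map_congr_left (g := fun _ => t / gc)
      (by intro i hi; rw [PySem.List.mem_pyRange_one] at hi; simp; omega)]
    rw [List.map_const', PySem.List.length_pyRange_one]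

theorem pvQ_eq_valid (t mi ma gc : Int) (h : 1 ≤ gc) : pvQ t mi ma gc = pvValid t mi ma gc := by
  have h0 : 0 < gc := by omega
  have hr0 : 0 ≤ t % gc := Int.emod_nonneg t (by omega)
  have hr1 : t % gc < gc := Int.emod_lt_of_pos t h0
  unfold pvQ pvValid pvSplit
  rw [PySem.Int.floordiv_eq_ediv_of_pos h0, PySem.Int.mod_eq_emod_of_pos h0]
  rw [Bool.eq_iff_iff]
  simp only [List.all_eq_true, List.forall_mem_map, PySem.List.mem_pyRange_one,
    Bool.and_eq_true, Bool.or_eq_true, Bool.not_eq_true', decide_eq_true_eq,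
    decide_eq_false_iff_not, not_or, not_lt]
  constructor
  · rintro ⟨⟨hbma, hmib⟩, hall⟩
    refine ⟨⟨hmib, hbma⟩, ?_⟩
    by_cases hr : t % gc = 0
    · exact Or.inl hr
    · right
      have h00 := hall 0 ⟨le_refl 0, h0⟩
      rw [if_pos (by omega)] at h00
      exact h00.2
  · rintro ⟨⟨hmib, hbma⟩, hor⟩
    refine ⟨⟨hbma, hmib⟩, ?_⟩
    intro j hj
    split_ifs with hir
    · rcases hor with hr | hb
      · omega
      · exact ⟨by omega, hb⟩
    · exact ⟨hmib, hbma⟩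

theorem pv_length_pvSplit (t gc : Int) : (pvSplit t gc).length = gc.toNat := by
  simp [pvSplit, PySem.List.length_pyRange_one]

theorem pv_foldl_insertBy_asc {α : Type} (before : α → α → Bool) :
    ∀ (xs acc : List α), (∀ x ∈ xs, ∀ y ∈ acc, before x y = false) →
      xs.Pairwise (fun a b => before b a = false) →
      xs.foldl (fun acc x => PySem.List.insertBy before x acc) acc = acc ++ xs := by
  intro xs
  induction xs with
  | nil => intro acc _ _; simp
  | cons x xs ih =>
    intro acc hacc hp
    simp only [List.foldl_cons]
    rw [PySem.List.insertBy_of_forall_not_before before x acc (fun y hy => hacc x (by simp) y hy)]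
    rw [ih (acc ++ [x]) ?_ (List.pairwise_cons.mp hp).2]
    · simp
    · intro z hz y hy
      rcases List.mem_append.mp hy with hy1 | hy1
      · exact hacc z (by simp [hz]) y hy1
      · rw [List.mem_singleton.mp hy1]
        exact (List.pairwise_cons.mp hp).1 z hz

theorem pv_sorted2_eq_self {α κ₂ : Type} [LT κ₂] [DecidableLT κ₂] (xs : List α)
    (k1 : α → Int) (k2 : α → κ₂) (h : xs.Pairwise (fun a b => k1 a < k1 b)) :
    PySem.List.sorted2 xs k1 k2 = xs := by
  show xs.foldl _ [] = xs
  have := pv_foldl_insertBy_asc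
    (fun a b => decide (k1 a < k1 b) || (!decide (k1 b < k1 a) && decide (k2 a < k2 b)))
    xs [] (by intro x _ y hy; simp at hy)
    (h.imp (fun hab => by simp [hab, not_lt_of_gt hab]))
  simpa using this

theorem pv_head?_filter {α : Type} (p : α → Bool) (l : List α) :
    (l.filter p).head? = l.find? p := by
  induction l with
  | nil => rfl
  | cons x xs ih => by_cases h : p x <;> simp [h, ih]

-- A returns the split of the FIRST valid group count (or [total])
theorem pvA_char (t mi ma : Int) (h : ¬ t ≤ ma) :
    split_students t mi ma =
      (match (PySem.List.pyRange 1 (t + 1) 1).find? (pvValid t mi ma) with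
        | some gc => pvSplit t gc
        | none => [t]) := by
  have hfold : ∀ l : List Int, (∀ gc ∈ l, 1 ≤ gc) →
      l.foldl (fun acc group_count =>
        let base := PySem.Int.floordiv t group_count
        let remainder := PySem.Int.mod t group_count
        if base > ma ∨ base < mi then acc
        else
          let group_sizes := (PySem.List.pyRange 0 group_count 1).map
            (fun i => if i < remainder then base + 1 else base)
          if group_sizes.all (fun g => decide (mi ≤ g) && decide (g ≤ ma)) then
            acc ++ [group_sizes]
          else acc) [] = (l.filter (pvValid t mi ma)).map (pvSplit t) := by
    intro l hl
    rw [List.foldl_ext _ (fun acc gc => if pvValid t mi ma gc = true then acc ++ [pvSplit t gc] else acc) _ ?_]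
    · exact (PySem.List.foldl_append_if (pvValid t mi ma) (pvSplit t) l []).trans (by simp)
    · intro acc gc hgc
      show _ = if pvValid t mi ma gc = true then acc ++ [pvSplit t gc] else acc
      rw [← pvQ_eq_valid t mi ma gc (hl gc hgc)]
      by_cases hc : PySem.Int.floordiv t gc > ma ∨ PySem.Int.floordiv t gc < mi
      · simp [pvQ, hc]
      · simp [pvQ, pvSplit, hc]
  unfold split_students
  rw [if_neg h]
  rw [hfold _ (fun gc hgc => by rw [PySem.List.mem_pyRange_one] at hgc; omega)]
  rcases hfil : (PySem.List.pyRange 1 (t + 1) 1).filter (pvValid t mi ma) with _ | ⟨gc0, rest⟩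
  · have hnone : (PySem.List.pyRange 1 (t + 1) 1).find? (pvValid t mi ma) = none := by
      rw [← pv_head?_filter, hfil]; rfl
    rw [hnone]; simp
  · have hfind : (PySem.List.pyRange 1 (t + 1) 1).find? (pvValid t mi ma) = some gc0 := by
      rw [← pv_head?_filter, hfil]; rfl
    rw [hfind]
    have hmem : ∀ gc ∈ gc0 :: rest, 1 ≤ gc := by
      intro gc hgc
      have h1 : gc ∈ (PySem.List.pyRange 1 (t + 1) 1).filter (pvValid t mi ma) := hfil ▸ hgc
      have h2 := List.mem_of_mem_filter h1
      rw [PySem.List.mem_pyRange_one] at h2; omega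
    have hpairgc : (gc0 :: rest).Pairwise (· < ·) := by
      have hp := (PySem.List.pairwise_lt_pyRange_one 1 (t + 1)).filter (pvValid t mi ma)
      rw [hfil] at hp; exact hp
    have hpair : ((gc0 :: rest).map (pvSplit t)).Pairwise
        (fun a b => PySem.List.len a < PySem.List.len b) := by
      rw [List.pairwise_map]
      refine hpairgc.imp_of_mem ?_
      intro a b hain hbin hab
      have ha1 := hmem a hain
      have hb1 := hmem b hbin
      simp only [PySem.List.len_eq, pv_length_pvSplit]
      omega
    show (if ((gc0 :: rest).map (pvSplit t)) ≠ [] then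
        PySem.List.pyGetD
          (PySem.List.sorted2 ((gc0 :: rest).map (pvSplit t))
            (fun g => PySem.List.len g)
            (fun g => (PySem.List.max? g (fun x => x)).getD 0 - (PySem.List.min? g (fun x => x)).getD 0))
          0 [] else [t]) = pvSplit t gc0
    rw [pv_sorted2_eq_self _ _ _ hpair]
    simp [PySem.List.pyGetD_zero]

theorem pvB_loop_char (t mi ma : Int) (hma : 0 < ma) (ht : 0 ≤ t) :
    ∀ (n : Nat) (a : Int), n = (t + 1 - a).toNat → t / (ma + 1) < a →
      split_students_loop t mi ma (PySem.List.pyRange a (t + 1) 1) =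
        (match (PySem.List.pyRange a (t + 1) 1).find? (pvValid t mi ma) with
          | some gc => pvSplit t gc
          | none => [t]) := by
  intro n
  induction n with
  | zero =>
    intro a ha hlt
    rw [PySem.List.pyRange_one_eq_nil (by omega)]
    rfl
  | succ n ih =>
    intro a ha hlt
    have ha0 : 0 < a := by
      have : 0 ≤ t / (ma + 1) := Int.ediv_nonneg ht (by omega)
      omega
    have hat : a < t + 1 := by omega
    have hba : t / a ≤ ma := by
      have h1 : t < a * (ma + 1) := (Int.ediv_lt_iff_lt_mul (by omega)).mp hlt
      have h2 : t / a < ma + 1 := (Int.ediv_lt_iff_lt_mul ha0).mpr (by rw [mul_comm]; exact h1)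
      omega
    rw [PySem.List.pyRange_one_cons hat]
    show (let base := PySem.Int.floordiv t a
      let rem := PySem.Int.mod t a
      if base < mi then [t]
      else if rem = 0 ∨ base + 1 ≤ ma then
        List.replicate rem.toNat (base + 1) ++ List.replicate (a - rem).toNat base
      else split_students_loop t mi ma (PySem.List.pyRange (a + 1) (t + 1) 1)) = _
    rw [PySem.Int.floordiv_eq_ediv_of_pos ha0, PySem.Int.mod_eq_emod_of_pos ha0]
    by_cases hmi : t / a < mi
    · simp only [if_pos hmi]
      have hnone : ((a :: PySem.List.pyRange (a + 1) (t + 1) 1).find? (pvValid t mi ma)) = none := by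
        rw [List.find?_eq_none]
        intro gc hgc
        have hgc' : a ≤ gc ∧ gc < t + 1 := by
          rcases List.mem_cons.mp hgc with rfl | hgc2
          · exact ⟨le_refl _, hat⟩
          · rw [PySem.List.mem_pyRange_one] at hgc2; omega
        have hle : t / gc ≤ t / a := pv_ediv_anti ht ha0 hgc'.1
        simp [pvValid, PySem.Int.floordiv_eq_ediv_of_pos (show (0:Int) < gc by omega)]
        intro hmi2
        omega
      rw [hnone]
    · by_cases hcond : t % a = 0 ∨ t / a + 1 ≤ ma
      · simp only [if_neg hmi, if_pos hcond]
        have hvalid : pvValid t mi ma a = true := by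
          simp [pvValid, PySem.Int.floordiv_eq_ediv_of_pos ha0, PySem.Int.mod_eq_emod_of_pos ha0]
          constructor
          · omega
          · rcases hcond with h1 | h1
            · exact Or.inl (Int.dvd_of_emod_eq_zero h1)
            · exact Or.inr h1
        rw [List.find?_cons_of_pos hvalid]
        show _ = pvSplit t a
        rw [pvSplit_eq_replicate t a ha0,
          PySem.Int.floordiv_eq_ediv_of_pos ha0, PySem.Int.mod_eq_emod_of_pos ha0]
      · simp only [if_neg hmi, if_neg hcond]
        have hinvalid : pvValid t mi ma a = false := by
          simp [pvValid, PySem.Int.floordiv_eq_ediv_of_pos ha0, PySem.Int.mod_eq_emod_of_pos ha0]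
          omega
        rw [List.find?_cons_of_neg (by simp [hinvalid])]
        exact ih (a + 1) (by omega) (by omega)

theorem pvB_char (t mi ma : Int) (h1 : ¬ t ≤ ma) (h2 : ¬ ma ≤ 0) :
    split_students_alt t mi ma =
      (match (PySem.List.pyRange 1 (t + 1) 1).find? (pvValid t mi ma) with
        | some gc => pvSplit t gc
        | none => [t]) := by
  have hma : 0 < ma := by omega
  have ht : 0 ≤ t := by omega
  unfold split_students_alt
  rw [if_neg (by omega : ¬ (t ≤ ma ∨ ma ≤ 0))]
  rw [PySem.Int.floordiv_eq_ediv_of_pos (show (0:Int) < ma + 1 by omega)]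
  have hs1 : 1 ≤ t / (ma + 1) + 1 := by
    have : 0 ≤ t / (ma + 1) := Int.ediv_nonneg ht (by omega)
    omega
  have hs2 : t / (ma + 1) + 1 ≤ t + 1 := by
    have : t / (ma + 1) ≤ t := Int.ediv_le_self (ma + 1) ht
    omega
  rw [pvB_loop_char t mi ma hma ht ((t + 1 - (t / (ma + 1) + 1)).toNat) _ rfl (by omega)]
  rw [PySem.List.pyRange_one_append 1 (t / (ma + 1) + 1) (t + 1) hs1 hs2, List.find?_append]
  have hpre : (PySem.List.pyRange 1 (t / (ma + 1) + 1) 1).find? (pvValid t mi ma) = none := by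
    rw [List.find?_eq_none]
    intro gc hgc
    rw [PySem.List.mem_pyRange_one] at hgc
    have h0gc : 0 < gc := by omega
    have hle : gc * (ma + 1) ≤ t := (Int.le_ediv_iff_mul_le (by omega)).mp (by omega)
    have hge : ma + 1 ≤ t / gc := (Int.le_ediv_iff_mul_le h0gc).mpr (by rw [mul_comm]; exact hle)
    simp [pvValid, PySem.Int.floordiv_eq_ediv_of_pos h0gc]
    intro hmi2
    omega
  rw [hpre, Option.none_or]

-- ===== VERDICT (by name: the statement is the Claim_ definition above) =====
theorem split_students_spec : Claim_equal_split_students := by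
  intro t mi ma _
  unfold Spec_split_students
  by_cases h1 : t ≤ ma
  · simp [split_students, split_students_alt, h1]
  · by_cases h2 : ma ≤ 0
    · rw [pvA_char t mi ma h1]
      have hnone : (PySem.List.pyRange 1 (t + 1) 1).find? (pvValid t mi ma) = none := by
        rw [List.find?_eq_none]
        intro gc hgc
        rw [PySem.List.mem_pyRange_one] at hgc
        have h0 : 0 < gc := by omega
        have h1' : 1 ≤ t / gc := (Int.le_ediv_iff_mul_le h0).mpr (by omega)
        simp [pvValid, PySem.Int.floordiv_eq_ediv_of_pos h0]
        intro hmi2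
        omega
      rw [hnone]
      simp [split_students_alt, h1, h2]
    · rw [pvA_char t mi ma h1, pvB_char t mi ma h1 h2]
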